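-- pv_equiv track=rewrite | github.com/crossfire2025/2025-2-Case-task-4 | dragon.py | max_dragon_power
-- ===== SOURCE A (Python) =====
-- def max_dragon_power(n):
--     if n == 0:
--         return 0
--
--     max_power = 0
--
--     for sevens in range(n // 7 + 1):
--         remaining = n - sevens * 7
--
--         for threes in range(remaining // 3 + 1):
--             rest = remaining - threes * 3
--
--             for twos in range(rest // 2 + 1):
--                 ones = rest - twos * 2
--
--                 total_heads = sevens * 7 + threes * 3 + twos * 2 + ones
--                 if total_heads == n:
--                     power = (7 ** sevens) * (3 ** threes) * (2 ** twos) * (1 ** ones)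
--                     max_power = max(max_power, power)
--
--     return max_power
-- ===== SOURCE B (Python) =====
-- def max_dragon_power(n):
--     # Closed form: a 7 is never worth it (7 < 3*2*2 for the same 7 heads),
--     # so the optimum uses threes, topped up with twos; ones only pad.
--     if n <= 0:
--         return 0
--     if n == 1:
--         return 1
--     q, r = divmod(n, 3)
--     if r == 0:
--         return 3 ** q
--     if r == 1:
--         return 4 * 3 ** (q - 1)
--     return 2 * 3 ** q
-- ===== Notes on version B (the rewrite author's own statement) =====
-- stated objective: faster
-- what changed: Replaces the triple nested loop over (sevens, threes, twos) by the closed-form optimal partition (as many 3s as possible, remainder patched with 2s), computed with one divmod and one integer power.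
import Mathlib
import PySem

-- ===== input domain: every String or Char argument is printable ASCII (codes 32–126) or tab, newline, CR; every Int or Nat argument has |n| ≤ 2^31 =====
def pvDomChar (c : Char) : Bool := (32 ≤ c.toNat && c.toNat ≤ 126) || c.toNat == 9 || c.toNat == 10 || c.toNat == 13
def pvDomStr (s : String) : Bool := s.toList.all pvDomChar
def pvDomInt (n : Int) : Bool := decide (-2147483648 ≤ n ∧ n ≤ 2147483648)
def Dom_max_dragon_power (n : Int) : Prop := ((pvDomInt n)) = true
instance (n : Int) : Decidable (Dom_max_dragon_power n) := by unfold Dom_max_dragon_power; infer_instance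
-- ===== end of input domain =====

-- B replaces A's O(n^3) triple loop by the closed-form optimal partition (3s plus a patch of 2s): asymptotically faster.


-- ===== PORT A =====
-- Literal port of A's triple loop. Python `**` has nonnegative exponents here (loop
-- indices come from range), so `x ^ e.toNat` is exact.
def max_dragon_power (n : Int) : Int :=
  if n = 0 then 0
  else
    (PySem.List.pyRange 0 (PySem.Int.floordiv n 7 + 1) 1).foldl (fun mp sevens =>
      let remaining := n - sevens * 7
      (PySem.List.pyRange 0 (PySem.Int.floordiv remaining 3 + 1) 1).foldl (fun mp threes =>
        let rest := remaining - threes * 3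
        (PySem.List.pyRange 0 (PySem.Int.floordiv rest 2 + 1) 1).foldl (fun mp twos =>
          let ones := rest - twos * 2
          let total_heads := sevens * 7 + threes * 3 + twos * 2 + ones
          if total_heads = n then
            max mp ((7 : Int) ^ sevens.toNat * 3 ^ threes.toNat * 2 ^ twos.toNat * 1 ^ ones.toNat)
          else mp) mp) mp) 0

-- ===== PORT B =====
-- Literal port of Source B (closed form; exponents are nonnegative, so `^ ·.toNat` is exact).
def max_dragon_power_alt (n : Int) : Int :=
  if n ≤ 0 then 0
  else if n = 1 then 1
  else
    let q := PySem.Int.floordiv n 3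
    let r := PySem.Int.mod n 3
    if r = 0 then (3 : Int) ^ q.toNat
    else if r = 1 then 4 * (3 : Int) ^ (q - 1).toNat
    else 2 * (3 : Int) ^ q.toNat

-- ===== PRECONDITION & SPEC =====
def Spec_max_dragon_power (n : Int) (out : Int) : Prop := out = max_dragon_power_alt n
instance (n : Int) (out : Int) : Decidable (Spec_max_dragon_power n out) := by unfold Spec_max_dragon_power; infer_instance

-- ===== CLAIM (what is proved, stated in full; the proofs are below) =====
def Claim_equal_max_dragon_power : Prop := ∀ (n : Int), Dom_max_dragon_power n → Spec_max_dragon_power n (max_dragon_power n)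

-- ===== LEMMAS AND PROOFS =====

-- The common value: best power for a head budget of m (empty product = 1 at m = 0).
def bestG (m : Nat) : Int :=
  if m = 0 then 1
  else if m = 1 then 1
  else if m % 3 = 0 then (3 : Int) ^ (m / 3)
  else if m % 3 = 1 then 4 * (3 : Int) ^ (m / 3 - 1)
  else 2 * (3 : Int) ^ (m / 3)

lemma bestG_pos (m : Nat) : 1 ≤ bestG m := by
  have h1 : (1 : Int) ≤ 3 ^ (m / 3) := one_le_pow₀ (by norm_num)
  have h2 : (1 : Int) ≤ 3 ^ (m / 3 - 1) := one_le_pow₀ (by norm_num)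
  unfold bestG; split_ifs <;> nlinarith

lemma bestG_eq0 (m : Nat) (h2 : 2 ≤ m) (h : m % 3 = 0) : bestG m = (3 : Int) ^ (m / 3) := by
  unfold bestG; rw [if_neg (by omega), if_neg (by omega), if_pos h]

lemma bestG_eq1 (m : Nat) (h2 : 4 ≤ m) (h : m % 3 = 1) : bestG m = 4 * (3 : Int) ^ (m / 3 - 1) := by
  unfold bestG; rw [if_neg (by omega), if_neg (by omega), if_neg (by omega), if_pos h]

lemma bestG_eq2 (m : Nat) (_h2 : 2 ≤ m) (h : m % 3 = 2) : bestG m = 2 * (3 : Int) ^ (m / 3) := by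
  unfold bestG; rw [if_neg (by omega), if_neg (by omega), if_neg (by omega), if_neg (by omega)]

lemma bestG_mul3 (m : Nat) (h : 3 ≤ m) : 3 * bestG (m - 3) ≤ bestG m := by
  rcases Nat.lt_or_ge m 5 with hm | hm
  · interval_cases m <;> decide
  · have hr : m % 3 = 0 ∨ m % 3 = 1 ∨ m % 3 = 2 := by omega
    rcases hr with hr | hr | hr
    · rw [bestG_eq0 m (by omega) hr, bestG_eq0 (m - 3) (by omega) (by omega)]
      obtain ⟨k, hk⟩ : ∃ k, m / 3 = k + 1 := ⟨m / 3 - 1, by omega⟩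
      have e1 : (m - 3) / 3 = k := by omega
      rw [e1, hk, pow_succ]
      exact le_of_eq (by ring)
    · rw [bestG_eq1 m (by omega) hr, bestG_eq1 (m - 3) (by omega) (by omega)]
      obtain ⟨k, hk⟩ : ∃ k, m / 3 = k + 2 := ⟨m / 3 - 2, by omega⟩
      have e1 : (m - 3) / 3 - 1 = k := by omega
      have e2 : m / 3 - 1 = k + 1 := by omega
      rw [e1, e2, pow_succ]
      exact le_of_eq (by ring)
    · rw [bestG_eq2 m (by omega) hr, bestG_eq2 (m - 3) (by omega) (by omega)]
      obtain ⟨k, hk⟩ : ∃ k, m / 3 = k + 1 := ⟨m / 3 - 1, by omega⟩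
      have e1 : (m - 3) / 3 = k := by omega
      rw [e1, hk, pow_succ]
      exact le_of_eq (by ring)

lemma bestG_mul2 (m : Nat) (h : 2 ≤ m) : 2 * bestG (m - 2) ≤ bestG m := by
  rcases Nat.lt_or_ge m 5 with hm | hm
  · interval_cases m <;> decide
  · have hr : m % 3 = 0 ∨ m % 3 = 1 ∨ m % 3 = 2 := by omega
    rcases hr with hr | hr | hr
    · rw [bestG_eq0 m (by omega) hr, bestG_eq1 (m - 2) (by omega) (by omega)]
      obtain ⟨k, hk⟩ : ∃ k, m / 3 = k + 2 := ⟨m / 3 - 2, by omega⟩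
      have e1 : (m - 2) / 3 - 1 = k := by omega
      have hp : (1 : Int) ≤ 3 ^ k := one_le_pow₀ (by norm_num)
      rw [e1, hk, pow_add]
      nlinarith
    · rw [bestG_eq1 m (by omega) hr, bestG_eq2 (m - 2) (by omega) (by omega)]
      have e1 : (m - 2) / 3 = m / 3 - 1 := by omega
      rw [e1]
      exact le_of_eq (by ring)
    · rw [bestG_eq2 m (by omega) hr, bestG_eq0 (m - 2) (by omega) (by omega)]
      have e1 : (m - 2) / 3 = m / 3 := by omega
      rw [e1]

lemma bestG_mul7 (m : Nat) (h : 7 ≤ m) : 7 * bestG (m - 7) ≤ bestG m := by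
  have h3 := bestG_mul3 (m - 4) (by omega)
  have h2a := bestG_mul2 (m - 2) (by omega)
  have h2b := bestG_mul2 m (by omega)
  have hp := bestG_pos (m - 7)
  have e1 : m - 4 - 3 = m - 7 := by omega
  have e2 : m - 2 - 2 = m - 4 := by omega
  rw [e1] at h3; rw [e2] at h2a
  nlinarith

lemma bestG_bound : ∀ (a b c m : Nat), 7 * a + 3 * b + 2 * c ≤ m →
    (7 : Int) ^ a * 3 ^ b * 2 ^ c ≤ bestG m := by
  intro a
  induction a with
  | succ a iha =>
    intro b c m hm
    have h := iha b c (m - 7) (by omega)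
    have h7 := bestG_mul7 m (by omega)
    calc (7 : Int) ^ (a + 1) * 3 ^ b * 2 ^ c = 7 * ((7 : Int) ^ a * 3 ^ b * 2 ^ c) := by ring
      _ ≤ 7 * bestG (m - 7) := by nlinarith
      _ ≤ bestG m := h7
  | zero =>
    intro b
    induction b with
    | succ b ihb =>
      intro c m hm
      have h := ihb c (m - 3) (by omega)
      have h3 := bestG_mul3 m (by omega)
      calc (7 : Int) ^ 0 * 3 ^ (b + 1) * 2 ^ c = 3 * ((7 : Int) ^ 0 * 3 ^ b * 2 ^ c) := by ring
        _ ≤ 3 * bestG (m - 3) := by nlinarith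
        _ ≤ bestG m := h3
    | zero =>
      intro c
      induction c with
      | succ c ihc =>
        intro m hm
        have h := ihc (m - 2) (by omega)
        have h2 := bestG_mul2 m (by omega)
        calc (7 : Int) ^ 0 * 3 ^ 0 * 2 ^ (c + 1) = 2 * ((7 : Int) ^ 0 * 3 ^ 0 * 2 ^ c) := by ring
          _ ≤ 2 * bestG (m - 2) := by nlinarith
          _ ≤ bestG m := h2
      | zero =>
        intro m _
        simpa using bestG_pos m

lemma bestG_attain (m : Nat) (hm : 1 ≤ m) :
    ∃ b c : Nat, 3 * b + 2 * c ≤ m ∧ (3 : Int) ^ b * 2 ^ c = bestG m := by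
  rcases Nat.lt_or_ge m 2 with hm2 | hm2
  · have : m = 1 := by omega
    subst this
    exact ⟨0, 0, by omega, by decide⟩
  · have hr : m % 3 = 0 ∨ m % 3 = 1 ∨ m % 3 = 2 := by omega
    rcases hr with hr | hr | hr
    · exact ⟨m / 3, 0, by omega, by rw [bestG_eq0 m (by omega) hr]; ring⟩
    · exact ⟨m / 3 - 1, 2, by omega, by rw [bestG_eq1 m (by omega) hr]; ring⟩
    · exact ⟨m / 3, 1, by omega, by rw [bestG_eq2 m (by omega) hr]; ring⟩

-- loop-shape lemmas for A's running max
lemma foldl_mono {α : Type} (f : Int → α → Int) (h : ∀ acc x, acc ≤ f acc x) :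
    ∀ (l : List α) (acc : Int), acc ≤ l.foldl f acc := by
  intro l
  induction l with
  | nil => intro acc; simp
  | cons x t ih => intro acc; exact le_trans (h acc x) (ih (f acc x))

lemma foldl_le {α : Type} (f : Int → α → Int) (B : Int) :
    ∀ (l : List α) (acc : Int), acc ≤ B → (∀ acc' x, x ∈ l → acc' ≤ B → f acc' x ≤ B) →
    l.foldl f acc ≤ B := by
  intro l
  induction l with
  | nil => intro acc h _; simpa using h
  | cons x t ih =>
    intro acc hacc hstep
    exact ih (f acc x) (hstep acc x (by simp) hacc)
      (fun a y hy ha => hstep a y (by simp [hy]) ha)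

lemma foldl_ge {α : Type} (f : Int → α → Int) (h : ∀ acc x, acc ≤ f acc x) (v : Int) :
    ∀ (l : List α) (x : α), x ∈ l → (∀ acc, v ≤ f acc x) →
    ∀ acc, v ≤ l.foldl f acc := by
  intro l
  induction l with
  | nil => intro x hx; exact absurd hx (by simp)
  | cons y t ih =>
    intro x hx hv acc
    rcases List.mem_cons.mp hx with rfl | hx'
    · exact le_trans (hv acc) (foldl_mono f h t (f acc x))
    · exact ih x hx' hv (f acc y)

theorem A_eq_G (n : Int) (hn : 1 ≤ n) : max_dragon_power n = bestG n.toNat := by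
  unfold max_dragon_power
  rw [if_neg (by omega)]
  apply le_antisymm
  · -- every candidate the loops produce is bounded by bestG
    refine foldl_le _ (bestG n.toNat) _ _ (by have := bestG_pos n.toNat; omega) ?_
    intro mp s hs hmp
    rw [PySem.List.mem_pyRange_one] at hs
    have hs7 : s * 7 ≤ n := ((PySem.Int.le_floordiv_iff_mul_le (by norm_num)).mp (by omega))
    try dsimp only
    refine foldl_le _ (bestG n.toNat) _ _ hmp ?_
    intro mp' t ht hmp'
    rw [PySem.List.mem_pyRange_one] at ht
    have ht3 : t * 3 ≤ n - s * 7 := ((PySem.Int.le_floordiv_iff_mul_le (by norm_num)).mp (by omega))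
    try dsimp only
    refine foldl_le _ (bestG n.toNat) _ _ hmp' ?_
    intro mp'' w hw hmp''
    rw [PySem.List.mem_pyRange_one] at hw
    have hw2 : w * 2 ≤ n - s * 7 - t * 3 := ((PySem.Int.le_floordiv_iff_mul_le (by norm_num)).mp (by omega))
    try dsimp only
    rw [if_pos (by ring)]
    refine max_le hmp'' ?_
    rw [one_pow, mul_one]
    exact bestG_bound s.toNat t.toNat w.toNat n.toNat (by omega)
  · -- bestG is attained by a candidate of the loops (sevens = 0)
    obtain ⟨b, c, hbc, hval⟩ := bestG_attain n.toNat (by omega)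
    have hbcn : (b : Int) * 3 + (c : Int) * 2 ≤ n := by omega
    have hmono_in : ∀ (s t : Int) (mp w : Int),
        mp ≤ (if s * 7 + t * 3 + w * 2 + (n - s * 7 - t * 3 - w * 2) = n then
              max mp ((7 : Int) ^ s.toNat * 3 ^ t.toNat * 2 ^ w.toNat *
                1 ^ (n - s * 7 - t * 3 - w * 2).toNat) else mp) := by
      intro s t mp w; split_ifs
      · exact le_max_left _ _
      · exact le_rfl
    refine foldl_ge _ ?_ _ _ (0 : Int) ?_ ?_ 0
    · intro mp s
      try dsimp only
      exact foldl_mono _ (fun mp' t => by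
        try dsimp only
        exact foldl_mono _ (fun mp'' w => hmono_in s t mp'' w) _ _) _ _
    · rw [PySem.List.mem_pyRange_one]
      constructor
      · exact le_rfl
      · have : (0 : Int) ≤ PySem.Int.floordiv n 7 :=
          (PySem.Int.le_floordiv_iff_mul_le (by norm_num)).mpr (by omega)
        omega
    · intro acc
      try dsimp only
      refine foldl_ge _ (fun mp' t => by
          try dsimp only
          exact foldl_mono _ (fun mp'' w => hmono_in 0 t mp'' w) _ _)
        _ _ ((b : Int)) ?_ ?_ acc
      · rw [PySem.List.mem_pyRange_one]
        constructor
        · positivity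
        · have : (b : Int) ≤ PySem.Int.floordiv (n - 0 * 7) 3 :=
            (PySem.Int.le_floordiv_iff_mul_le (by norm_num)).mpr (by omega)
          omega
      · intro acc'
        try dsimp only
        refine foldl_ge _ (fun mp'' w => hmono_in 0 (b : Int) mp'' w)
          _ _ ((c : Int)) ?_ ?_ acc'
        · rw [PySem.List.mem_pyRange_one]
          constructor
          · positivity
          · have : (c : Int) ≤ PySem.Int.floordiv (n - 0 * 7 - (b : Int) * 3) 2 :=
              (PySem.Int.le_floordiv_iff_mul_le (by norm_num)).mpr (by omega)
            omega
        · intro acc''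
          try dsimp only
          rw [if_pos (by ring)]
          refine le_trans (le_of_eq ?_) (le_max_right _ _)
          rw [← hval]
          simp [Int.toNat_natCast, one_pow, pow_zero, one_mul, mul_one]

theorem alt_eq_G (n : Int) (hn : 1 ≤ n) : max_dragon_power_alt n = bestG n.toNat := by
  have hd : PySem.Int.floordiv n 3 = n / 3 := PySem.Int.floordiv_eq_ediv_of_pos (by norm_num)
  have hm : PySem.Int.mod n 3 = n % 3 := PySem.Int.mod_eq_emod_of_pos (by norm_num)
  by_cases h1 : n = 1
  · subst h1; decide
  · unfold max_dragon_power_alt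
    rw [if_neg (by omega), if_neg h1]
    simp only [hd, hm]
    have hq0 : (n / 3).toNat = n.toNat / 3 := by omega
    have hq1 : (n / 3 - 1).toNat = n.toNat / 3 - 1 := by omega
    by_cases h0 : n % 3 = 0
    · rw [if_pos h0, bestG_eq0 n.toNat (by omega) (by omega), hq0]
    · rw [if_neg h0]
      by_cases h1' : n % 3 = 1
      · rw [if_pos h1', bestG_eq1 n.toNat (by omega) (by omega), hq1]
      · rw [if_neg h1', bestG_eq2 n.toNat (by omega) (by omega), hq0]

-- ===== VERDICT (by name: the statement is the Claim_ definition above) =====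
theorem max_dragon_power_spec : Claim_equal_max_dragon_power := by
  intro n _
  unfold Spec_max_dragon_power
  rcases lt_trichotomy n 0 with hneg | rfl | hpos
  · unfold max_dragon_power max_dragon_power_alt
    rw [if_neg (by omega), if_pos (by omega)]
    have hlt : PySem.Int.floordiv n 7 < 0 :=
      (PySem.Int.floordiv_lt_iff_lt_mul (by norm_num)).mpr (by omega)
    rw [PySem.List.pyRange_one_eq_nil (by omega)]
    rfl
  · decide
  · rw [A_eq_G n (by omega), alt_eq_G n (by omega)]
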